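-- pv_equiv track=rewrite | github.com/kvit274/beat_auto_uploader | src/gen_metadata.py | limit_tags
-- ===== SOURCE A (Python) =====
-- from typing import List
--
-- def limit_tags(tags: List[str], limit: int = 500) -> List[str]:
--     total = 0
--     selected = []
--     for tag in tags:
--         tag_length = len(tag.replace(",", ""))  # ignore commas
--         if total + tag_length <= limit:
--             selected.append(tag)
--             total += tag_length
--         else:
--             break
--     return selected
-- ===== SOURCE B (Python) =====
-- from typing import List
-- from bisect import bisect_right
-- from itertools import accumulate
--
-- def limit_tags(tags: List[str], limit: int = 500) -> List[str]:
--     # Prefix sums of comma-stripped lengths are non-decreasing, so the kept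
--     # prefix ends exactly at bisect_right(cums, limit).
--     cums = list(accumulate(len(t.replace(",", "")) for t in tags))
--     return tags[:bisect_right(cums, limit)]
-- ===== Notes on version B (the rewrite author's own statement) =====
-- stated objective: alternative
-- what changed: Instead of a stateful loop that conditionally appends each tag and breaks, B builds the prefix-sum table of comma-stripped lengths and locates the cutoff index by binary search (bisect_right), then slices the tag list; correctness relies on the prefix sums being non-decreasing.
import Mathlib
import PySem

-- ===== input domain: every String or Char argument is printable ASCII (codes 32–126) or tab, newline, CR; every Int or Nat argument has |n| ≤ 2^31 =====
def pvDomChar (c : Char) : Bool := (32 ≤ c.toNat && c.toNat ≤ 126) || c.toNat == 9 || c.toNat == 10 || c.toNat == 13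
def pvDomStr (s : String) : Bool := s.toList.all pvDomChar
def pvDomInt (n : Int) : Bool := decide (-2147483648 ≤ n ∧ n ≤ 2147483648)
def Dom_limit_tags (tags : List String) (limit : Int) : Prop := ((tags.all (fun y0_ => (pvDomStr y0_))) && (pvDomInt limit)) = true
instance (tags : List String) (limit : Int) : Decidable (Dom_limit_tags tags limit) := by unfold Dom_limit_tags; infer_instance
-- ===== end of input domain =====

-- B replaces A's accumulator loop (conditional append / break) by a prefix-sum
-- table plus a binary-search cutoff (bisect_right) and a slice (alternative
-- decomposition, same asymptotic cost).

-- ===== PORT A =====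
-- the for-loop with `break`: structural recursion over tags carrying `total`
def limit_tags_loop (tags : List String) (total : Int) (limit : Int) : List String :=
  match tags with
  | [] => []
  | tag :: rest =>
    let tag_length : Int := PySem.Str.len (PySem.Str.replace tag "," "")
    if total + tag_length ≤ limit then
      tag :: limit_tags_loop rest (total + tag_length) limit
    else
      []

def limit_tags (tags : List String) (limit : Int) : List String :=
  limit_tags_loop tags 0 limit

-- ===== PORT B =====
-- len(t.replace(",", ""))
def strippedLen (t : String) : Int := PySem.Str.len (PySem.Str.replace t "," "")

def limit_tags_alt (tags : List String) (limit : Int) : List String :=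
  -- cums = list(accumulate(len(t.replace(",", "")) for t in tags))
  let cums : List Int := (List.scanl (· + ·) 0 (tags.map strippedLen)).tail
  -- tags[:bisect_right(cums, limit)]
  tags.take (PySem.List.bisectRight cums limit)

-- ===== PRECONDITION & SPEC =====
def Spec_limit_tags (tags : List String) (limit : Int) (out : List String) : Prop := out = limit_tags_alt tags limit
instance (tags : List String) (limit : Int) (out : List String) : Decidable (Spec_limit_tags tags limit out) := by unfold Spec_limit_tags; infer_instance

-- ===== CLAIM =====
def Claim_equal_limit_tags : Prop := ∀ (tags : List String) (limit : Int), Dom_limit_tags tags limit → Spec_limit_tags tags limit (limit_tags tags limit)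

-- ===== LEMMAS AND PROOFS =====

-- every element of scanl (+) b xs with nonnegative xs is ≥ b
lemma le_of_mem_scanl (b : Int) (xs : List Int) (hxs : ∀ y ∈ xs, 0 ≤ y) :
    ∀ z ∈ List.scanl (· + ·) b xs, b ≤ z := by
  induction xs generalizing b with
  | nil => intro z hz; simp [List.scanl_nil] at hz; omega
  | cons x rest ih =>
    intro z hz
    rw [List.scanl_cons] at hz
    rcases List.mem_cons.1 hz with rfl | h
    · omega
    · have hx : 0 ≤ x := hxs x (by simp)
      have := ih (b + x) (fun y hy => hxs y (by simp [hy])) z h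
      omega

lemma scanl_sorted (b : Int) (xs : List Int) (hxs : ∀ y ∈ xs, 0 ≤ y) :
    (List.scanl (· + ·) b xs).Pairwise (· ≤ ·) := by
  induction xs generalizing b with
  | nil => simp [List.scanl_nil]
  | cons x rest ih =>
    rw [List.scanl_cons, List.pairwise_cons]
    refine ⟨fun z hz => ?_, ih (b + x) (fun y hy => hxs y (by simp [hy]))⟩
    have hx : 0 ≤ x := hxs x (by simp)
    have := le_of_mem_scanl (b + x) rest (fun y hy => hxs y (by simp [hy])) z hz
    omega

lemma strippedLen_nonneg (t : String) : 0 ≤ strippedLen t := by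
  simp [strippedLen, PySem.Str.len]

-- A's loop, started at `total`, keeps exactly the tags while the (offset) prefix
-- sums stay ≤ limit; stated via the index r that separates ≤-limit from >-limit.
lemma limit_tags_loop_take (tags : List String) (total limit : Int) (r : Nat)
    (hr : r ≤ tags.length)
    (h1 : ∀ j, j < tags.length → j < r →
      ((List.scanl (· + ·) total (tags.map strippedLen)).tail).getD j 0 ≤ limit)
    (h2 : ∀ j, j < tags.length → r ≤ j →
      limit < ((List.scanl (· + ·) total (tags.map strippedLen)).tail).getD j 0) :
    limit_tags_loop tags total limit = tags.take r := by
  induction tags generalizing total r with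
  | nil => simp [limit_tags_loop]
  | cons tag rest ih =>
    have hhead : ((List.scanl (· + ·) total ((tag :: rest).map strippedLen)).tail).getD 0 0 =
        total + strippedLen tag := by
      rw [List.map_cons, List.scanl_cons, List.tail_cons]
      cases rest <;> simp [List.scanl_nil, List.scanl_cons]
    cases r with
    | zero =>
      have := h2 0 (by simp) (Nat.zero_le _)
      rw [hhead] at this
      simp only [limit_tags_loop, List.take_zero, strippedLen] at this ⊢
      rw [if_neg (by omega)]
    | succ r' =>
      have hle := h1 0 (by simp) (Nat.succ_pos _)
      rw [hhead] at hle
      simp only [limit_tags_loop]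
      rw [if_pos (by simpa [strippedLen] using hle)]
      simp only [List.take_succ_cons]
      congr 1
      refine ih (total + strippedLen tag) r' (by simpa using hr) ?_ ?_
      · intro j hj hjr
        have := h1 (j + 1) (by simpa using hj) (by omega)
        simpa [List.map_cons, List.scanl_cons, List.tail_cons] using this
      · intro j hj hjr
        have := h2 (j + 1) (by simpa using hj) (by omega)
        simpa [List.map_cons, List.scanl_cons, List.tail_cons] using this

-- ===== VERDICT =====
theorem limit_tags_spec : Claim_equal_limit_tags := by
  intro tags limit _
  unfold Spec_limit_tags limit_tags limit_tags_alt
  set cums : List Int := (List.scanl (· + ·) 0 (tags.map strippedLen)).tail with hcums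
  have hlen : cums.length = tags.length := by
    simp [hcums, List.length_scanl]
  have hsorted : cums.Pairwise (· ≤ ·) := by
    have := scanl_sorted 0 (tags.map strippedLen)
      (by intro y hy; rcases List.mem_map.1 hy with ⟨t, _, rfl⟩; exact strippedLen_nonneg t)
    exact this.sublist (List.tail_sublist _)
  obtain ⟨hb1, hb2, hb3⟩ := PySem.List.bisectRight_spec cums limit hsorted
  exact limit_tags_loop_take tags 0 limit (PySem.List.bisectRight cums limit)
    (hlen ▸ hb1)
    (fun j hj hjr => by
      rw [List.getD_eq_getElem cums 0 (by omega)]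
      exact hb2 j (by omega) hjr)
    (fun j hj hjr => by
      rw [List.getD_eq_getElem cums 0 (by omega)]
      exact hb3 j (by omega) hjr)
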